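-- pv_equiv track=rewrite | github.com/pypi-data/pypi-mirror-354 | packages/tfq0seo/tfq0seo-2.0.0-py3-none-any.whl/tfq0seo/seo_analyzer_app.py | _get_key_findings
-- ===== SOURCE A (Python) =====
-- from typing import Dict, List, Optional, Any, Callable
--
-- def _get_key_findings(analysis: Dict) -> List[str]:
--     """Get key findings from analysis results."""
--     findings = []
--
--     # Add strongest aspects
--     findings.extend([
--         f"Strength: {aspect}"
--         for aspect in analysis.get('insights', {}).get('positive_aspects', [])[:3]
--     ])
--
--     # Add major improvement areas
--     findings.extend([
--         f"Improvement: {improvement}"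
--         for improvement in analysis.get('insights', {}).get('major_improvements', [])[:3]
--     ])
--
--     # Add competitive insights
--     findings.extend([
--         f"Competition: {insight}"
--         for insight in analysis.get('insights', {}).get('market_opportunities', [])[:2]
--     ])
--
--     return findings
-- ===== SOURCE B (Python) =====
-- def _get_key_findings(analysis):
--     """Get key findings from analysis results."""
--     insights = analysis.get('insights', {})
--
--     def prepend(prefix, items, limit, acc):
--         # Recursively cons "prefix: item" for at most `limit` items onto acc.
--         if limit == 0 or not items:
--             return acc
--         return [f"{prefix}: {items[0]}"] + prepend(prefix, items[1:], limit - 1, acc)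
--
--     # Assemble the result back-to-front: last section first.
--     acc = prepend('Competition', insights.get('market_opportunities', []), 2, [])
--     acc = prepend('Improvement', insights.get('major_improvements', []), 3, acc)
--     return prepend('Strength', insights.get('positive_aspects', []), 3, acc)
-- ===== Notes on version B (the rewrite author's own statement) =====
-- stated objective: alternative
-- what changed: Replaced three slice-then-map comprehension extends with a recursive cons-based helper that counts a limit down item by item (no slicing) and assembles the result back-to-front, last section first, onto an accumulator.
import Mathlib
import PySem

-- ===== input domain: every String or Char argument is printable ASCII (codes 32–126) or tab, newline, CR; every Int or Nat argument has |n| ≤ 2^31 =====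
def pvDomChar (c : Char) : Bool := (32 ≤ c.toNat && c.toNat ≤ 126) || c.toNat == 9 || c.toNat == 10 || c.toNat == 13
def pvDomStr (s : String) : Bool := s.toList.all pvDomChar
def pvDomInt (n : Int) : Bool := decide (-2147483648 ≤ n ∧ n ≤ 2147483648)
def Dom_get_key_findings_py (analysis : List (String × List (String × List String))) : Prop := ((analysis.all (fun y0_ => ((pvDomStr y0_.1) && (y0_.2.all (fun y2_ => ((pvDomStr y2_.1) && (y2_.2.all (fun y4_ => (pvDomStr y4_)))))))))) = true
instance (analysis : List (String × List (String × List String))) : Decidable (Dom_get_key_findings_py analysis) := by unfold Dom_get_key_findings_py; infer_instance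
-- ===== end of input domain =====

-- B replaces the three slice+map extends by a recursive cons helper with a countdown limit,
-- assembling the result back-to-front (objective: alternative).

-- dict.get(k, dflt) on an association list: first match, else default (exact for Python dict.get)
def pyAListGetD {α : Type} (d : List (String × α)) (k : String) (dflt : α) : α :=
  ((d.find? (fun p => p.1 == k)).map (·.2)).getD dflt

-- ===== PORT A =====
def get_key_findings_py (analysis : List (String × List (String × List String))) : List String :=
  let findings : List String := []
  let findings := findings ++
    (PySem.List.slice (pyAListGetD (pyAListGetD analysis "insights" []) "positive_aspects" []) none (some 3)).map
      (fun aspect => "Strength: " ++ aspect)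
  let findings := findings ++
    (PySem.List.slice (pyAListGetD (pyAListGetD analysis "insights" []) "major_improvements" []) none (some 3)).map
      (fun improvement => "Improvement: " ++ improvement)
  let findings := findings ++
    (PySem.List.slice (pyAListGetD (pyAListGetD analysis "insights" []) "market_opportunities" []) none (some 2)).map
      (fun insight => "Competition: " ++ insight)
  findings

-- ===== PORT B =====
-- B's recursive helper: cons "prefix: item" for at most `limit` items onto acc
def prependFmt (pre : String) (items : List String) (limit : Nat) (acc : List String) : List String :=
  match limit, items with
  | 0, _ => acc
  | _, [] => acc
  | Nat.succ n, x :: xs => (pre ++ ": " ++ x) :: prependFmt pre xs n acc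

def get_key_findings_py_alt (analysis : List (String × List (String × List String))) : List String :=
  let insights := pyAListGetD analysis "insights" []
  let acc := prependFmt "Competition" (pyAListGetD insights "market_opportunities" []) 2 []
  let acc := prependFmt "Improvement" (pyAListGetD insights "major_improvements" []) 3 acc
  prependFmt "Strength" (pyAListGetD insights "positive_aspects" []) 3 acc

-- ===== PRECONDITION & SPEC =====
def Spec_get_key_findings_py (analysis : List (String × List (String × List String))) (out : List String) : Prop := out = get_key_findings_py_alt analysis
instance (analysis : List (String × List (String × List String))) (out : List String) : Decidable (Spec_get_key_findings_py analysis out) := by unfold Spec_get_key_findings_py; infer_instance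

-- ===== CLAIM =====
def Claim_equal_get_key_findings_py : Prop := ∀ (analysis : List (String × List (String × List String))), Dom_get_key_findings_py analysis → Spec_get_key_findings_py analysis (get_key_findings_py analysis)

-- ===== LEMMAS AND PROOFS =====
theorem prependFmt_eq (pre : String) (items : List String) (limit : Nat) (acc : List String) :
    prependFmt pre items limit acc = (items.take limit).map (fun x => pre ++ ": " ++ x) ++ acc := by
  induction items generalizing limit with
  | nil => cases limit <;> simp [prependFmt]
  | cons x xs ih => cases limit with
    | zero => simp [prependFmt]
    | succ n => simp [prependFmt, ih]

theorem slice_take3 (xs : List String) : PySem.List.slice xs none (some 3) = xs.take 3 := by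
  have := PySem.List.slice_to_natCast xs 3; simpa using this

theorem slice_take2 (xs : List String) : PySem.List.slice xs none (some 2) = xs.take 2 := by
  have := PySem.List.slice_to_natCast xs 2; simpa using this

-- ===== VERDICT =====
theorem get_key_findings_py_spec : Claim_equal_get_key_findings_py := by
  intro analysis _
  unfold Spec_get_key_findings_py get_key_findings_py get_key_findings_py_alt
  simp [prependFmt_eq, slice_take3, slice_take2]
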